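-- pv_equiv track=rewrite | github.com/branchev/SoftUni | python_advanced/exam_preparation/scheduling.py | run_the_scheduling
-- ===== SOURCE A (Python) =====
-- def run_the_scheduling(jobs, index):
--     searched_job_value = jobs[index]
--     jobs = sorted(jobs)
--     while True:
--         job_to_remove_from_scheduling = jobs.pop()
--         if job_to_remove_from_scheduling == searched_job_value:
--             jobs.append(job_to_remove_from_scheduling)
--             break
--     return sum(jobs)
-- ===== SOURCE B (Python) =====
-- def run_the_scheduling(jobs, index):
--     searched_job_value = jobs[index]
--     return sum(job for job in jobs if job <= searched_job_value)
-- ===== Notes on version B (the rewrite author's own statement) =====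
-- stated objective: simpler
-- what changed: Replaces sort-then-pop-until-found with a single linear pass summing the values <= jobs[index] (the popped elements are exactly those > jobs[index]); no sort, no mutation.
import Mathlib
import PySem

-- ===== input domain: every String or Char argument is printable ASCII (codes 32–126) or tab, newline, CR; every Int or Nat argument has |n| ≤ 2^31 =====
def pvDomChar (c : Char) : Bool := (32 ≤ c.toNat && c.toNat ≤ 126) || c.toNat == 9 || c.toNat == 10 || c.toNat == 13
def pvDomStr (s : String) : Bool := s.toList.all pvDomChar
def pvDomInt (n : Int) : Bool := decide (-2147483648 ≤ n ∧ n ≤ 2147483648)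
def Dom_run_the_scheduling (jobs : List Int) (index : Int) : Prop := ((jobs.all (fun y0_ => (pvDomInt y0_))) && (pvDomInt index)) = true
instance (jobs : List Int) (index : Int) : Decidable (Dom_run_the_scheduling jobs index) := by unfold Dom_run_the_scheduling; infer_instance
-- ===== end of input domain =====

-- B replaces A's sort + pop-until-found loop by a single linear pass summing the values ≤ jobs[index] (simpler: no sort, no mutation).

-- ===== PORT A =====
-- the 'while True: jobs.pop() …' loop, run on the REVERSE of the sorted list so that
-- each 'pop from the end' is one head step; none = pop() on an empty list (IndexError)
def pvPopLoop (s : Int) : List Int → Option (List Int)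
  | [] => none
  | x :: rest => if x = s then some (x :: rest) else pvPopLoop s rest

def run_the_scheduling (jobs : List Int) (index : Int) : Int :=
  match PySem.List.pyGet? jobs index with
  | none => 0  -- IndexError: outside Pre_
  | some searched_job_value =>
    let sortedJobs := PySem.List.sorted jobs (fun x => x) false
    match pvPopLoop searched_job_value sortedJobs.reverse with
    | none => 0  -- pop() on empty: unreachable, searched_job_value ∈ jobs
    | some remaining => remaining.sum  -- sum(jobs) of what is left (sum is order-independent)

-- ===== PORT B =====
def run_the_scheduling_alt (jobs : List Int) (index : Int) : Int :=
  match PySem.List.pyGet? jobs index with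
  | none => 0  -- IndexError: outside Pre_
  | some searched_job_value =>
    jobs.foldl (fun total job => if job ≤ searched_job_value then total + job else total) 0

-- ===== PRECONDITION & SPEC =====
-- A raises IndexError on jobs[index] when the index is out of range; exactly those inputs are excluded.
def Pre_run_the_scheduling (jobs : List Int) (index : Int) : Prop :=
  PySem.Raise.InRange jobs.length index
instance (jobs : List Int) (index : Int) : Decidable (Pre_run_the_scheduling jobs index) := by
  unfold Pre_run_the_scheduling; infer_instance

def pvWitness_run_the_scheduling : List Int × Int := ([3, 1, 2], 1)

def Spec_run_the_scheduling (jobs : List Int) (index : Int) (out : Int) : Prop := out = run_the_scheduling_alt jobs index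
instance (jobs : List Int) (index : Int) (out : Int) : Decidable (Spec_run_the_scheduling jobs index out) := by unfold Spec_run_the_scheduling; infer_instance

-- ===== CLAIM (what is proved, stated in full; the proofs are below) =====
def Claim_equal_run_the_scheduling : Prop := ∀ (jobs : List Int) (index : Int), Dom_run_the_scheduling jobs index → Pre_run_the_scheduling jobs index → Spec_run_the_scheduling jobs index (run_the_scheduling jobs index)

-- ===== LEMMAS AND PROOFS =====

-- B's fold accumulates the sum of the elements ≤ s
theorem pv_foldl_filter_sum (s : Int) (l : List Int) (acc : Int) :
    l.foldl (fun total job => if job ≤ s then total + job else total) acc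
      = acc + (l.filter (fun j => decide (j ≤ s))).sum := by
  induction l generalizing acc with
  | nil => simp
  | cons x t ih =>
    by_cases hx : x ≤ s <;> simp [List.foldl, hx, ih] <;> ring

-- on a descending list containing s, the pop loop succeeds and the remainder sums
-- to the sum of the elements ≤ s
theorem pv_popLoop_sum (s : Int) (r : List Int)
    (hsort : r.Pairwise (fun a b => b ≤ a)) (hmem : s ∈ r) :
    ∃ r', pvPopLoop s r = some r' ∧ r'.sum = (r.filter (fun j => decide (j ≤ s))).sum := by
  induction r with
  | nil => cases hmem
  | cons x t ih =>
    rcases List.pairwise_cons.mp hsort with ⟨hx, ht⟩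
    by_cases hxs : x = s
    · refine ⟨x :: t, by simp [pvPopLoop, hxs], ?_⟩
      have hall : ∀ j ∈ x :: t, decide (j ≤ s) = true := by
        intro j hj
        rcases List.mem_cons.mp hj with h | h
        · simp [h, hxs.symm ▸ le_refl s]; omega
        · have := hx j h; simp; omega
      rw [List.filter_eq_self.mpr hall]
    · have hst : s ∈ t := by
        rcases List.mem_cons.mp hmem with h | h
        · exact absurd h.symm hxs
        · exact h
      have hle : s ≤ x := hx s hst
      have hnx : ¬ (x ≤ s) := fun h => hxs (le_antisymm h hle)
      rcases ih ht hst with ⟨r', hr', hsum⟩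
      refine ⟨r', by simp [pvPopLoop, hxs, hr'], ?_⟩
      rw [List.filter_cons]
      simp [hnx, hsum]

-- ===== VERDICT (by name: the statement is the Claim_ definition above) =====
theorem run_the_scheduling_spec : Claim_equal_run_the_scheduling := by
  intro jobs index _ hpre
  unfold Spec_run_the_scheduling run_the_scheduling run_the_scheduling_alt
  obtain ⟨s, hs⟩ : ∃ s, PySem.List.pyGet? jobs index = some s := by
    cases hg : PySem.List.pyGet? jobs index with
    | none => exact absurd hpre (by simpa [PySem.List.pyGet?_eq_none_iff] using hg)
    | some v => exact ⟨v, rfl⟩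
  rw [hs]
  have hsmem : s ∈ jobs := PySem.List.mem_of_pyGet?_eq_some jobs hs
  set L := PySem.List.sorted jobs (fun x => x) false with hL
  have hperm : L.Perm jobs := PySem.List.sorted_perm jobs (fun x => x) false
  have hpw : L.Pairwise (fun a b => a ≤ b) := PySem.List.sorted_pairwise jobs (fun x => x)
  have hpwr : L.reverse.Pairwise (fun a b => b ≤ a) := by
    rw [List.pairwise_reverse]; exact hpw
  have hmemr : s ∈ L.reverse := by
    rw [List.mem_reverse]; exact hperm.mem_iff.mpr hsmem
  rcases pv_popLoop_sum s L.reverse hpwr hmemr with ⟨r', hr', hsum⟩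
  simp only [hr']
  rw [hsum, pv_foldl_filter_sum, List.filter_reverse, List.sum_reverse,
    (hperm.filter (fun j => decide (j ≤ s))).sum_eq]
  ring
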